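-- pv_equiv track=rewrite | github.com/LarrySnyder/stockpyl | src/stockpyl/meio_general.py | _base_stock_group_assignments
-- ===== SOURCE A (Python) =====
-- def _base_stock_group_assignments(node_indices, groups=None):
-- 	"""Build dict indicating, for each node index, the group that the node is
-- 	assigned to for the purposes of base-stock-level optimization.
--
-- 	Grouping nodes that should have the same base-stock level speeds the optimization
-- 	since the base-stock levels for the nodes in a given group do not have to be
-- 	optimized individually.
--
-- 	Group indices will not be consecutive; some group indices will have no members.
--
-- 	Parameters
-- 	----------
-- 	node_indices : list
-- 		List of indices of all nodes in the network.
-- 	groups : list of sets, optional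
-- 		A list of sets, each of which contains indices of nodes that should have the
-- 		same base-stock level. Any nodes not contained in any set in the list are
-- 		optimized individually. If omitted, all nodes are optimized individually.
--
-- 	Returns
-- 	-------
-- 	opt_group : dict
-- 		A dict in which each key is the index of a node in ``network`` and each
-- 		value is the index of the optimization group the node is assigned to.
-- 	group_list : list
-- 		A list in which each item is a list of node indices corresponding to one
-- 		group. This is the same as the ``groups`` list provided, but with
-- 		singletons filled in.
-- 	"""
--
-- 	# Initialize dict.
-- 	opt_group = {}
--
-- 	# Were any groups provided?
-- 	if groups is None:
-- 		opt_group = {n_ind: n_ind for n_ind in node_indices}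
-- 	else:
-- 		# For each node, look for it in a group.
-- 		for n_ind in node_indices:
-- 			for node_set in groups:
-- 				if n_ind in node_set:
-- 					# Assign group in dict.
-- 					opt_group[n_ind] = min(node_set)
--
-- 			# Check whether we already assigned node; if not, assign it to its own
-- 			# group.
-- 			if n_ind not in opt_group:
-- 				opt_group[n_ind] = n_ind
--
-- 	# Build group_list.
-- 	group_list = []
-- 	for i in node_indices:
-- 		g = [n_ind for n_ind in node_indices if opt_group[n_ind] == i]
-- 		if g:
-- 			group_list.append(g)
--
-- 	return opt_group, group_list
-- ===== SOURCE B (Python) =====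
-- def _base_stock_group_assignments(node_indices, groups=None):
-- 	if groups is None:
-- 		opt_group = {n: n for n in node_indices}
-- 	else:
-- 		# One pass over groups: each member maps to its group's min; later groups override.
-- 		rep = {}
-- 		for node_set in groups:
-- 			m = min(node_set) if node_set else None
-- 			for x in node_set:
-- 				rep[x] = m
-- 		opt_group = {n: rep.get(n, n) for n in node_indices}
--
-- 	# Bucket nodes by assigned group in one pass, then emit buckets in node_indices order.
-- 	buckets = {}
-- 	for n in node_indices:
-- 		buckets.setdefault(opt_group[n], []).append(n)
-- 	group_list = [buckets[i] for i in node_indices if i in buckets]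
--
-- 	return opt_group, group_list
-- ===== Notes on version B (the rewrite author's own statement) =====
-- stated objective: faster
-- what changed: B replaces A's per-node scan of all groups and per-node rescan of all nodes by one pass over groups building a member-to-representative dict and one bucketing pass over nodes, emitting buckets in node order.
import Mathlib
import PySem

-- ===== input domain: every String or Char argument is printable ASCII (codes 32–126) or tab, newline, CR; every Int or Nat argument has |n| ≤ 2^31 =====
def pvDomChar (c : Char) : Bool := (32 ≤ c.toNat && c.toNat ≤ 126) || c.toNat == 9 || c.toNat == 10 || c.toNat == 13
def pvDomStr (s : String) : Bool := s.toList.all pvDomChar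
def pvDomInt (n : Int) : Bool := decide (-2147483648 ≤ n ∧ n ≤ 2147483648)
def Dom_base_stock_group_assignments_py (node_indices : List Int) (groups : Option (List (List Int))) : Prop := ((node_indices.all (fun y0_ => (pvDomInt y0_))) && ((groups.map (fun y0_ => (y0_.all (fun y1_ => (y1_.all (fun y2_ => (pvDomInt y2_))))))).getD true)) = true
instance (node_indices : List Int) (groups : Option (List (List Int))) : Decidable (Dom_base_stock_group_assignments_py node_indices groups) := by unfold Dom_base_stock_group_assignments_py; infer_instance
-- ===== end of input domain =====

-- B buckets nodes by group representative in one dict pass instead of A's nested scans: O(n + total group size) vs O(n·(n+g)).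
-- min(node_set): only evaluated under 'n ∈ gs', so gs is nonempty there and the `.getD 0` default is never the result.
def pvMin (gs : List Int) : Int := (PySem.List.min? gs (fun x => x)).getD 0

-- ===== PORT A =====
def base_stock_group_assignments_py (node_indices : List Int) (groups : Option (List (List Int))) : (List (Int × Int)) × List (List Int) :=
  -- opt_group
  let opt_group : PySem.Dict Int Int :=
    match groups with
    | none => node_indices.foldl (fun d n => d.insert n n) PySem.Dict.empty
    | some gl =>
      node_indices.foldl (fun d n =>
        let d1 := gl.foldl (fun d gs => if n ∈ gs then d.insert n (pvMin gs) else d) d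
        if d1.contains n then d1 else d1.insert n n) PySem.Dict.empty
  -- group_list; opt_group[n] cannot raise KeyError (every n ∈ node_indices is a key), so getD's default 0 is never the result
  let group_list : List (List Int) :=
    node_indices.foldl (fun acc i =>
      let g := node_indices.filter (fun n => opt_group.getD n 0 == i)
      if g = [] then acc else acc ++ [g]) []
  (opt_group.items, group_list)

-- ===== PORT B =====
def base_stock_group_assignments_py_alt (node_indices : List Int) (groups : Option (List (List Int))) : (List (Int × Int)) × List (List Int) :=
  let opt_group : PySem.Dict Int Int :=
    match groups with
    | none => node_indices.foldl (fun d n => d.insert n n) PySem.Dict.empty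
    | some gl =>
      -- rep: each member maps to its group's min; later groups override ('m = None' branch never inserted: empty loop)
      let rep : PySem.Dict Int Int :=
        gl.foldl (fun r gs => let m := pvMin gs; gs.foldl (fun r x => r.insert x m) r) PySem.Dict.empty
      node_indices.foldl (fun d n => d.insert n (rep.getD n n)) PySem.Dict.empty
  -- buckets.setdefault(opt_group[n], []).append(n)  (lookup cannot raise: every n is a key)
  let buckets : PySem.Dict Int (List Int) :=
    node_indices.foldl (fun b n =>
      let g := opt_group.getD n 0
      b.insert g (b.getD g [] ++ [n])) PySem.Dict.empty
  let group_list : List (List Int) := node_indices.filterMap (fun i => buckets.get? i)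
  (opt_group.items, group_list)

-- ===== PRECONDITION & SPEC =====
def Spec_base_stock_group_assignments_py (node_indices : List Int) (groups : Option (List (List Int))) (out : (List (Int × Int)) × List (List Int)) : Prop := out = base_stock_group_assignments_py_alt node_indices groups
instance (node_indices : List Int) (groups : Option (List (List Int))) (out : (List (Int × Int)) × List (List Int)) : Decidable (Spec_base_stock_group_assignments_py node_indices groups out) := by unfold Spec_base_stock_group_assignments_py; infer_instance

-- ===== CLAIM (what is proved, stated in full; the proofs are below) =====
def Claim_equal_base_stock_group_assignments_py : Prop := ∀ (node_indices : List Int) (groups : Option (List (List Int))), Dom_base_stock_group_assignments_py node_indices groups → Spec_base_stock_group_assignments_py node_indices groups (base_stock_group_assignments_py node_indices groups)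

-- ===== LEMMAS AND PROOFS =====

-- the representative of the LAST group (in `gl`) containing n, if any
def pvLastMin (n : Int) : List (List Int) → Option Int
  | [] => none
  | gs :: rest =>
    match pvLastMin n rest with
    | some v => some v
    | none => if n ∈ gs then some (pvMin gs) else none

theorem pv_innerA_eq (n : Int) : ∀ (gl : List (List Int)) (d : PySem.Dict Int Int),
    gl.foldl (fun d gs => if n ∈ gs then d.insert n (pvMin gs) else d) d
    = (match pvLastMin n gl with
       | some v => d.insert n v
       | none => d) := by
  intro gl
  induction gl with
  | nil => intro d; simp [pvLastMin]
  | cons gs rest ih =>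
    intro d
    simp only [List.foldl_cons, pvLastMin]
    rw [ih]
    by_cases h : n ∈ gs <;> cases hlm : pvLastMin n rest <;>
      simp [h, PySem.Dict.insert_insert_self]

theorem pv_rep_inner_get? (m : Int) : ∀ (gs : List Int) (r : PySem.Dict Int Int) (k : Int),
    (gs.foldl (fun r x => r.insert x m) r).get? k = if k ∈ gs then some m else r.get? k := by
  intro gs
  induction gs with
  | nil => intro r k; simp
  | cons x t ih =>
    intro r k
    simp only [List.foldl_cons]
    rw [ih]
    by_cases hk : k ∈ t
    · simp [hk]
    · by_cases hx : k = x <;>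
        simp [hk, hx, PySem.Dict.get?_insert, List.mem_cons]

theorem pv_rep_get? : ∀ (gl : List (List Int)) (r : PySem.Dict Int Int) (k : Int),
    (gl.foldl (fun r gs => gs.foldl (fun r x => r.insert x (pvMin gs)) r) r).get? k
    = ((pvLastMin k gl).orElse (fun _ => r.get? k)) := by
  intro gl
  induction gl with
  | nil => intro r k; simp [pvLastMin]
  | cons gs rest ih =>
    intro r k
    simp only [List.foldl_cons, pvLastMin]
    rw [ih, pv_rep_inner_get? (pvMin gs) gs r k]
    cases hlm : pvLastMin k rest <;> by_cases h : k ∈ gs <;> simp [h, Option.orElse]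

-- insert of an already-present binding is the identity (keys unique)
theorem pv_insert_self_eq (d : PySem.Dict Int Int) (k w : Int)
    (hnd : d.keys.Nodup) (hg : d.get? k = some w) : d.insert k w = d := by
  have hc : d.contains k = true := by
    rw [PySem.Dict.contains_eq_isSome_get?, hg]; rfl
  apply PySem.Dict.ext
  rw [PySem.Dict.items_insert, if_pos hc]
  conv_rhs => rw [← List.map_id d.items]
  apply List.map_congr_left
  intro p hp
  by_cases he : p.1 = k
  · have := PySem.Dict.get?_of_mem_items (d := d) (k := p.1) (v := p.2) (by simpa using hp) hnd
    rw [he, hg] at this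
    have hv : p.2 = w := Option.some_inj.mp this.symm
    simp only [he, beq_self_eq_true, if_true, id]
    rw [← he, ← hv]
  · simp [he]

def pvVal (gl : List (List Int)) (n : Int) : Int := (pvLastMin n gl).getD n

-- invariant-carrying equality of the two opt_group folds (groups = some gl)
theorem pv_opt_eq (gl : List (List Int)) : ∀ (ns : List Int) (d : PySem.Dict Int Int),
    d.keys.Nodup → (∀ k w, d.get? k = some w → w = pvVal gl k) →
    ns.foldl (fun d n =>
        let d1 := gl.foldl (fun d gs => if n ∈ gs then d.insert n (pvMin gs) else d) d
        if d1.contains n then d1 else d1.insert n n) d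
    = ns.foldl (fun d n => d.insert n (pvVal gl n)) d := by
  intro ns
  induction ns with
  | nil => intro d _ _; rfl
  | cons n t ih =>
    intro d hnd hval
    simp only [List.foldl_cons]
    have hstep : (let d1 := gl.foldl (fun d gs => if n ∈ gs then d.insert n (pvMin gs) else d) d
        if d1.contains n then d1 else d1.insert n n) = d.insert n (pvVal gl n) := by
      simp only []
      rw [pv_innerA_eq]
      cases hlm : pvLastMin n gl with
      | some v =>
        simp only [PySem.Dict.contains_insert_self, if_true, pvVal, hlm, Option.getD]
      | none =>
        simp only [pvVal, hlm, Option.getD]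
        by_cases hc : d.contains n = true
        · have hs : (d.get? n).isSome := by rw [← PySem.Dict.contains_eq_isSome_get?, hc]
          obtain ⟨w, hw⟩ := Option.isSome_iff_exists.mp hs
          have : w = pvVal gl n := hval n w hw
          rw [hc, if_pos rfl]
          rw [pvVal, hlm, Option.getD] at this
          exact (pv_insert_self_eq d n n hnd (this ▸ hw)).symm
        · simp [hc]
    rw [hstep]
    exact ih (d.insert n (pvVal gl n)) (PySem.Dict.nodup_keys_insert _ _ _ hnd)
      (by
        intro k w hk
        rw [PySem.Dict.get?_insert] at hk
        by_cases hkn : k = n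
        · rw [if_pos hkn] at hk; rw [hkn]; exact Option.some_inj.mp hk.symm
        · rw [if_neg hkn] at hk; exact hval k w hk)

-- bucket characterisation: get? of the bucket fold is the filter of the processed list
theorem pv_bucket_get? (w : Int → Int) : ∀ (ns : List Int) (b : PySem.Dict Int (List Int)) (i : Int),
    (ns.foldl (fun b n => b.insert (w n) (b.getD (w n) [] ++ [n])) b).get? i
    = (if ns.filter (fun n => w n == i) = [] then b.get? i
       else some (b.getD i [] ++ ns.filter (fun n => w n == i))) := by
  intro ns
  induction ns with
  | nil => intro b i; simp
  | cons n t ih =>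
    intro b i
    simp only [List.foldl_cons, List.filter_cons]
    by_cases h : w n = i
    · subst h
      rw [ih]
      by_cases hf : t.filter (fun m => w m == w n) = [] <;>
        simp [hf]
    · have hb : (w n == i) = false := by simpa using h
      rw [ih]
      simp only [hb, Bool.false_eq_true, if_false]
      have hne : i ≠ w n := fun he => h he.symm
      simp [PySem.Dict.get?_insert, PySem.Dict.getD_insert, hne]

-- A's group_list fold equals B's filterMap over the buckets
theorem pv_glist_eq (w : Int → Int) (ns : List Int) : ∀ (ns' : List Int) (acc : List (List Int)),
    ns'.foldl (fun acc i =>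
        let g := ns.filter (fun n => w n == i)
        if g = [] then acc else acc ++ [g]) acc
    = acc ++ ns'.filterMap (fun i =>
        (ns.foldl (fun b n => b.insert (w n) (b.getD (w n) [] ++ [n])) PySem.Dict.empty).get? i) := by
  intro ns'
  induction ns' with
  | nil => intro acc; simp
  | cons i t ih =>
    intro acc
    have hb := pv_bucket_get? w ns PySem.Dict.empty i
    by_cases hf : ns.filter (fun n => w n == i) = []
    · rw [if_pos hf, PySem.Dict.get?_empty] at hb
      rw [List.filterMap_cons_none hb]
      simp only [List.foldl_cons]
      rw [if_pos hf]
      exact ih acc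
    · rw [if_neg hf, PySem.Dict.getD_empty] at hb
      rw [List.filterMap_cons_some hb]
      simp only [List.foldl_cons]
      rw [if_neg hf, ih]
      simp

-- ===== VERDICT (by name: the statement is the Claim_ definition above) =====
theorem base_stock_group_assignments_py_spec : Claim_equal_base_stock_group_assignments_py := by
  intro ns groups _
  unfold Spec_base_stock_group_assignments_py base_stock_group_assignments_py base_stock_group_assignments_py_alt
  cases groups with
  | none =>
    simp only []
    rw [pv_glist_eq]
    simp
  | some gl =>
    simp only []
    have hopt : ns.foldl (fun d n =>
          let d1 := gl.foldl (fun d gs => if n ∈ gs then d.insert n (pvMin gs) else d) d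
          if d1.contains n then d1 else d1.insert n n) PySem.Dict.empty
        = ns.foldl (fun d n =>
            d.insert n ((gl.foldl (fun r gs => let m := pvMin gs; gs.foldl (fun r x => r.insert x m) r) PySem.Dict.empty).getD n n)) PySem.Dict.empty := by
      rw [pv_opt_eq gl ns PySem.Dict.empty (by simp) (by simp [PySem.Dict.get?_empty])]
      apply PySem.List.foldl_congr_mem
      intro d n _
      congr 1
      rw [PySem.Dict.getD_eq_get?_getD, pv_rep_get?]
      simp [PySem.Dict.get?_empty, pvVal]
    rw [hopt, pv_glist_eq]
    simp
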